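-- pv_equiv track=rewrite | github.com/cirosantilli/project-euler-solvers | solvers/401.py | sigma2_summatory
-- ===== SOURCE A (Python) =====
-- from typing import Final
--
-- MOD: Final[int] = 10**9
--
-- def sum_sq_mod(n: int, mod: int) -> int:
--     """Return sum_{i=1..n} i^2 modulo mod using exact division by 6."""
--     if n <= 0:
--         return 0
--     a = n
--     b = n + 1
--     c = 2 * n + 1
--
--     if a % 2 == 0:
--         a //= 2
--     else:
--         b //= 2
--
--     if a % 3 == 0:
--         a //= 3
--     elif b % 3 == 0:
--         b //= 3
--     else:
--         c //= 3
--
--     return (a % mod) * (b % mod) % mod * (c % mod) % mod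
--
-- def sigma2_summatory(n: int, mod: int = MOD) -> int:
--     """Compute SIGMA_2(n) = sum_{k=1..n} sigma_2(k) modulo mod."""
--     total = 0
--     l = 1
--     prev_s2_mod = 0
--     while l <= n:
--         q = n // l
--         r = n // q
--         s2_r_mod = sum_sq_mod(r, mod)
--         range_sum_mod = s2_r_mod - prev_s2_mod
--         if range_sum_mod < 0:
--             range_sum_mod += mod
--         total = (total + range_sum_mod * (q % mod)) % mod
--         prev_s2_mod = s2_r_mod
--         l = r + 1
--     return total
-- ===== SOURCE B (Python) =====
-- from typing import Final
--
-- MOD: Final[int] = 10**9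
--
-- def sum_sq_mod(n: int, mod: int) -> int:
--     """Return sum_{i=1..n} i^2 modulo mod using exact division by 6."""
--     if n <= 0:
--         return 0
--     a = n
--     b = n + 1
--     c = 2 * n + 1
--
--     if a % 2 == 0:
--         a //= 2
--     else:
--         b //= 2
--
--     if a % 3 == 0:
--         a //= 3
--     elif b % 3 == 0:
--         b //= 3
--     else:
--         c //= 3
--
--     return (a % mod) * (b % mod) % mod * (c % mod) % mod
--
-- def sigma2_summatory(n: int, mod: int = MOD) -> int:
--     """Compute SIGMA_2(n) = sum_{k=1..n} sigma_2(k) modulo mod via the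
--     Dirichlet hyperbola identity for sigma_2 = Id^2 * 1."""
--     if n <= 0:
--         return 0
--     # integer square root without imports: largest s with s*s <= n
--     s = 0
--     while (s + 1) * (s + 1) <= n:
--         s += 1
--     term1 = 0
--     term2 = 0
--     for d in range(1, s + 1):
--         term1 = (term1 + (d * d % mod) * (n // d % mod)) % mod
--         term2 = (term2 + sum_sq_mod(n // d, mod)) % mod
--     correction = sum_sq_mod(s, mod) * (s % mod) % mod
--     return (term1 + term2 - correction) % mod
-- ===== Notes on version B (the rewrite author's own statement) =====
-- stated objective: faster
-- what changed: Replaces A's quotient-block sweep (walk l through all ~2*sqrt(n) blocks of constant n//l, telescoping sum_sq_mod differences) by the Dirichlet hyperbola identity for sigma_2 = Id^2 * 1: one loop over d = 1..isqrt(n) accumulating d^2*(n//d) and sum_sq_mod(n//d) with a single overlap correction sum_sq_mod(s)*s.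
import Mathlib
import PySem

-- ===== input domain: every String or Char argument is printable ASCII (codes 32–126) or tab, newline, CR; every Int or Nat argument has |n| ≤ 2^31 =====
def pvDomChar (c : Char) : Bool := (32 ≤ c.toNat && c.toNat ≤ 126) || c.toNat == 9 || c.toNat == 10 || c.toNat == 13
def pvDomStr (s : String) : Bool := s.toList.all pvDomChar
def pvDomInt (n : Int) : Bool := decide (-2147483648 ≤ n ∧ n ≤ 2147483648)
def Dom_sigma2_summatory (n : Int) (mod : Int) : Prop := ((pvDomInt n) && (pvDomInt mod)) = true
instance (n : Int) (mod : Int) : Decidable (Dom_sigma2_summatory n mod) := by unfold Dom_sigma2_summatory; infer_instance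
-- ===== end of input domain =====

-- B replaces A's quotient-block sweep by the Dirichlet hyperbola identity for sigma_2 = Id^2 * 1
-- (one loop d = 1..isqrt(n) instead of ~2*sqrt(n) quotient blocks); intended constant-factor speedup.

-- ===== PORT A =====
-- helper sum_sq_mod (identical source in Source A and Source B, shared by both ports)
def sum_sq_mod (n : Int) (mod : Int) : Int :=
  if n ≤ 0 then 0
  else
    let a := n
    let b := n + 1
    let c := 2 * n + 1
    -- if a % 2 == 0: a //= 2 else: b //= 2
    let ab := if PySem.Int.mod a 2 = 0 then (PySem.Int.floordiv a 2, b) else (a, PySem.Int.floordiv b 2)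
    -- if a % 3 == 0: a //= 3 elif b % 3 == 0: b //= 3 else: c //= 3
    let abc :=
      if PySem.Int.mod ab.1 3 = 0 then (PySem.Int.floordiv ab.1 3, ab.2, c)
      else if PySem.Int.mod ab.2 3 = 0 then (ab.1, PySem.Int.floordiv ab.2 3, c)
      else (ab.1, ab.2, PySem.Int.floordiv c 3)
    PySem.Int.mod (PySem.Int.mod (PySem.Int.mod abc.1 mod * PySem.Int.mod abc.2.1 mod) mod * PySem.Int.mod abc.2.2 mod) mod

-- the while-loop of A; the Nat argument is pure fuel (never exhausted when the guard can still hold)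
def sigma2Loop (n : Int) (mod : Int) : Nat → Int → Int → Int → Int
  | 0, total, _, _ => total
  | fuel + 1, total, l, prev_s2_mod =>
    if l ≤ n then
      let q := PySem.Int.floordiv n l
      let r := PySem.Int.floordiv n q
      let s2_r_mod := sum_sq_mod r mod
      let range_sum_mod0 := s2_r_mod - prev_s2_mod
      let range_sum_mod := if range_sum_mod0 < 0 then range_sum_mod0 + mod else range_sum_mod0
      sigma2Loop n mod fuel (PySem.Int.mod (total + range_sum_mod * PySem.Int.mod q mod) mod) (r + 1) s2_r_mod
    else total

def sigma2_summatory (n : Int) (mod : Int) : Int :=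
  sigma2Loop n mod (n.toNat + 1) 0 1 0

-- ===== PORT B =====
-- Source B: while (s+1)*(s+1) <= n: s += 1   (fuel only; for n ≥ 1 it stops after isqrt(n) ≤ n steps)
def isqrtLoop (n : Int) : Nat → Int → Int
  | 0, s => s
  | fuel + 1, s => if (s + 1) * (s + 1) ≤ n then isqrtLoop n fuel (s + 1) else s

def sigma2_summatory_alt (n : Int) (mod : Int) : Int :=
  if n ≤ 0 then 0
  else
    let s := isqrtLoop n n.toNat 0
    -- for d in range(1, s+1): term1 = (term1 + (d*d % mod)*(n//d % mod)) % mod; term2 = (term2 + sum_sq_mod(n//d, mod)) % mod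
    let p := (PySem.List.pyRange 1 (s + 1) 1).foldl
      (fun (tp : Int × Int) d =>
        (PySem.Int.mod (tp.1 + PySem.Int.mod (d * d) mod * PySem.Int.mod (PySem.Int.floordiv n d) mod) mod,
         PySem.Int.mod (tp.2 + sum_sq_mod (PySem.Int.floordiv n d) mod) mod))
      (0, 0)
    let correction := PySem.Int.mod (sum_sq_mod s mod * PySem.Int.mod s mod) mod
    PySem.Int.mod (p.1 + p.2 - correction) mod

-- ===== PRECONDITION & SPEC =====
-- Pre_ excludes exactly the inputs where A raises ZeroDivisionError: mod = 0 with n ≥ 1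
-- (for n ≤ 0 the loop body never runs and A returns 0 even when mod = 0).
def Pre_sigma2_summatory (n : Int) (mod : Int) : Prop := mod ≠ 0 ∨ n ≤ 0
instance (n : Int) (mod : Int) : Decidable (Pre_sigma2_summatory n mod) := by unfold Pre_sigma2_summatory; infer_instance
def pvWitness_sigma2_summatory : Int × Int := (10, 7)

def Spec_sigma2_summatory (n : Int) (mod : Int) (out : Int) : Prop := out = sigma2_summatory_alt n mod
instance (n : Int) (mod : Int) (out : Int) : Decidable (Spec_sigma2_summatory n mod out) := by unfold Spec_sigma2_summatory; infer_instance

-- ===== CLAIM (what is proved, stated in full; the proofs are below) =====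
def Claim_equal_sigma2_summatory : Prop := ∀ (n : Int) (mod : Int), Dom_sigma2_summatory n mod → Pre_sigma2_summatory n mod → Spec_sigma2_summatory n mod (sigma2_summatory n mod)

-- ===== LEMMAS AND PROOFS =====

-- S2 x = 1² + 2² + … + x²   and   T N = Σ_{d=1..N} d²·(N/d)  (the exact summatory value)
def pvS2 (x : Nat) : Nat := ∑ i ∈ Finset.Ioc 0 x, i ^ 2
def pvT (N : Nat) : Nat := ∑ d ∈ Finset.Ioc 0 N, d ^ 2 * (N / d)

-- ---- Python-mod congruence toolkit ----
theorem pymod_modeq (x m : Int) : Int.ModEq m (PySem.Int.mod x m) x := by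
  have h := PySem.Int.floordiv_mul_add_mod x m
  have : x - PySem.Int.mod x m = m * PySem.Int.floordiv x m := by linarith
  exact Int.modEq_iff_dvd.mpr ⟨PySem.Int.floordiv x m, this⟩

theorem pymod_congr {m x y : Int} (hm : m ≠ 0) (h : Int.ModEq m x y) :
    PySem.Int.mod x m = PySem.Int.mod y m := by
  have hmod : Int.ModEq m (PySem.Int.mod x m) (PySem.Int.mod y m) :=
    ((pymod_modeq x m).trans h).trans (pymod_modeq y m).symm
  obtain ⟨k, hk⟩ := Int.modEq_iff_dvd.mp hmod
  rcases lt_or_gt_of_ne hm with hneg | hpos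
  · have b1 := PySem.Int.mod_neg_bounds x hneg
    have b2 := PySem.Int.mod_neg_bounds y hneg
    rcases lt_trichotomy k 0 with hk0 | hk0 | hk0
    · nlinarith
    · subst hk0; simp at hk; omega
    · nlinarith
  · have b1n := PySem.Int.mod_nonneg x hpos
    have b1l := PySem.Int.mod_lt x hpos
    have b2n := PySem.Int.mod_nonneg y hpos
    have b2l := PySem.Int.mod_lt y hpos
    rcases lt_trichotomy k 0 with hk0 | hk0 | hk0
    · nlinarith
    · subst hk0; simp at hk; omega
    · nlinarith

theorem pymod_mul_chain (m a b c : Int) (hm : m ≠ 0) :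
    PySem.Int.mod (PySem.Int.mod (PySem.Int.mod a m * PySem.Int.mod b m) m * PySem.Int.mod c m) m
      = PySem.Int.mod (a * b * c) m := by
  apply pymod_congr hm
  exact ((pymod_modeq _ m).trans ((pymod_modeq a m).mul (pymod_modeq b m))).mul (pymod_modeq c m)

theorem six_mul_pvS2 (N : Nat) : 6 * pvS2 N = N * (N + 1) * (2 * N + 1) := by
  induction N with
  | zero => simp [pvS2]
  | succ k ih =>
    rw [pvS2, Finset.sum_Ioc_succ_top (Nat.zero_le _), ← pvS2, Nat.mul_add, ih]
    ring

-- ---- sum_sq_mod is S2 mod m ----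
theorem sum_sq_mod_eq (x m : Int) (hm : m ≠ 0) (hx : 0 ≤ x) :
    sum_sq_mod x m = PySem.Int.mod ((pvS2 x.toNat : Nat) : Int) m := by
  by_cases hx1 : x ≤ 0
  · have : x = 0 := le_antisymm hx1 hx
    subst this
    simp [sum_sq_mod, pvS2, PySem.Int.mod]
  · have h6S : 6 * ((pvS2 x.toNat : Nat) : Int) = x * (x + 1) * (2 * x + 1) := by
      obtain ⟨N, rfl⟩ := Int.eq_ofNat_of_zero_le hx
      have h := six_mul_pvS2 N
      simp only [Int.toNat_natCast]
      exact_mod_cast h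
    unfold sum_sq_mod
    rw [if_neg hx1]
    simp only [PySem.Int.mod_eq_emod_of_pos (show (0:Int) < 2 by norm_num),
               PySem.Int.mod_eq_emod_of_pos (show (0:Int) < 3 by norm_num),
               PySem.Int.floordiv_eq_ediv_of_pos (show (0:Int) < 2 by norm_num),
               PySem.Int.floordiv_eq_ediv_of_pos (show (0:Int) < 3 by norm_num)]
    have hmain : ∀ a b c : Int,
        6 * (a * b * c) = x * (x + 1) * (2 * x + 1) →
        PySem.Int.mod (PySem.Int.mod (PySem.Int.mod a m * PySem.Int.mod b m) m * PySem.Int.mod c m) m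
          = PySem.Int.mod ((pvS2 x.toNat : Nat) : Int) m := by
      intro a b c habc
      rw [pymod_mul_chain m a b c hm]
      congr 1
      omega
    have h60 : x % 6 = 0 ∨ x % 6 = 1 ∨ x % 6 = 2 ∨ x % 6 = 3 ∨ x % 6 = 4 ∨ x % 6 = 5 := by omega
    rcases h60 with h | h | h | h | h | h
    · obtain ⟨t, ht, h1, h2, h3⟩ : ∃ t, x = 6*t ∧ x % 2 = 0 ∧ (x/2) % 3 = 0 ∧ x/2/3 = t :=
        ⟨x/6, by omega, by omega, by omega, by omega⟩
      rw [if_pos h1]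
      simp only
      rw [if_pos h2]
      apply hmain
      subst ht; rw [h3]; ring
    · obtain ⟨t, ht, h1, h2, h3, h4⟩ : ∃ t, x = 6*t+1 ∧ ¬ x % 2 = 0 ∧ ¬ x % 3 = 0 ∧ ¬ ((x+1)/2) % 3 = 0 ∧ (2*x+1)/3 = 4*t+1 :=
        ⟨x/6, by omega, by omega, by omega, by omega, by omega⟩
      rw [if_neg h1]
      simp only
      rw [if_neg h2, if_neg h3]
      apply hmain
      rw [h4]; subst ht
      have : (6*t+1+1)/2 = 3*t+1 := by omega
      rw [this]; ring
    · obtain ⟨t, ht, h1, h2, h3, h4⟩ : ∃ t, x = 6*t+2 ∧ x % 2 = 0 ∧ ¬ (x/2) % 3 = 0 ∧ ((x+1)) % 3 = 0 ∧ (x+1)/3 = 2*t+1 :=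
        ⟨x/6, by omega, by omega, by omega, by omega, by omega⟩
      rw [if_pos h1]
      simp only
      rw [if_neg h2, if_pos h3]
      apply hmain
      rw [h4]; subst ht
      have : (6*t+2)/2 = 3*t+1 := by omega
      rw [this]; ring
    · obtain ⟨t, ht, h1, h2, h3⟩ : ∃ t, x = 6*t+3 ∧ ¬ x % 2 = 0 ∧ x % 3 = 0 ∧ x/3 = 2*t+1 :=
        ⟨x/6, by omega, by omega, by omega, by omega⟩
      rw [if_neg h1]
      simp only
      rw [if_pos h2]
      apply hmain
      rw [h3]; subst ht
      have : (6*t+3+1)/2 = 3*t+2 := by omega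
      rw [this]; ring
    · obtain ⟨t, ht, h1, h2, h3, h4⟩ : ∃ t, x = 6*t+4 ∧ x % 2 = 0 ∧ ¬ (x/2) % 3 = 0 ∧ ¬ (x+1) % 3 = 0 ∧ (2*x+1)/3 = 4*t+3 :=
        ⟨x/6, by omega, by omega, by omega, by omega, by omega⟩
      rw [if_pos h1]
      simp only
      rw [if_neg h2, if_neg h3]
      apply hmain
      rw [h4]; subst ht
      have : (6*t+4)/2 = 3*t+2 := by omega
      rw [this]; ring
    · obtain ⟨t, ht, h1, h2, h3, h4⟩ : ∃ t, x = 6*t+5 ∧ ¬ x % 2 = 0 ∧ ¬ x % 3 = 0 ∧ ((x+1)/2) % 3 = 0 ∧ (x+1)/2/3 = t+1 :=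
        ⟨x/6, by omega, by omega, by omega, by omega, by omega⟩
      rw [if_neg h1]
      simp only
      rw [if_neg h2, if_pos h3]
      apply hmain
      rw [h4]; subst ht; ring

-- ---- A: loop invariant ----
-- one quotient block, additively (no Nat subtraction)
theorem block_sum (N L R Q : Nat) (hL : 1 ≤ L) (hLR : L - 1 ≤ R)
    (hblock : ∀ d, L ≤ d → d ≤ R → N / d = Q) :
    (∑ d ∈ Finset.Ioc 0 R, d ^ 2 * (N / d)) + pvS2 (L - 1) * Q =
      (∑ d ∈ Finset.Ioc 0 (L - 1), d ^ 2 * (N / d)) + pvS2 R * Q := by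
  have hsplitT := Finset.sum_Ioc_consecutive (fun d => d ^ 2 * (N / d)) (Nat.zero_le (L-1)) hLR
  have hsplitS := Finset.sum_Ioc_consecutive (fun d => d ^ 2) (Nat.zero_le (L-1)) hLR
  have hmid : (∑ d ∈ Finset.Ioc (L-1) R, d ^ 2 * (N / d)) = (∑ d ∈ Finset.Ioc (L-1) R, d ^ 2) * Q := by
    rw [Finset.sum_mul]
    apply Finset.sum_congr rfl
    intro d hd
    rw [Finset.mem_Ioc] at hd
    rw [hblock d (by omega) hd.2]
  rw [pvS2, pvS2, ← hsplitT, ← hsplitS, hmid]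
  ring

theorem modeq_add_self (m X : Int) : Int.ModEq m (X + m) X :=
  Int.modEq_iff_dvd.mpr ⟨-1, by ring⟩

theorem sigma2Loop_inv (n m : Int) (hm : m ≠ 0) (hn : 1 ≤ n) :
    ∀ (fuel : Nat) (l : Int), 1 ≤ l → l ≤ n + 1 → n + 1 - l ≤ (fuel : Int) →
      sigma2Loop n m fuel
        (PySem.Int.mod ((∑ d ∈ Finset.Ioc 0 (l-1).toNat, d ^ 2 * (n.toNat / d) : Nat) : Int) m)
        l (sum_sq_mod (l - 1) m)
        = PySem.Int.mod ((pvT n.toNat : Nat) : Int) m := by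
  intro fuel
  induction fuel with
  | zero =>
    intro l h1 h2 h3
    have hl : l = n + 1 := by omega
    have he : (l - 1).toNat = n.toNat := by omega
    simp only [sigma2Loop, he, pvT]
  | succ fuel ih =>
    intro l h1 h2 h3
    by_cases hl : l ≤ n
    · -- arithmetic setup
      set N := n.toNat with hN
      set L := l.toNat with hL
      have hnN : n = (N : Int) := by omega
      have hlL : l = (L : Int) := by omega
      have hL1 : 1 ≤ L := by omega
      have hLN : L ≤ N := by omega
      set Q := N / L with hQ
      set R := N / Q with hR
      have hq : PySem.Int.floordiv n l = (Q : Int) := by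
        rw [hnN, hlL, PySem.Int.floordiv_natCast]
      have hQ1 : 1 ≤ Q := by
        rw [hQ]; exact (Nat.one_le_div_iff (by omega)).mpr hLN
      have hr : PySem.Int.floordiv n ((Q : Nat) : Int) = (R : Int) := by
        rw [hnN, PySem.Int.floordiv_natCast]
      have hLR : L ≤ R := by
        rw [hR]
        exact (Nat.le_div_iff_mul_le (by omega)).mpr (by rw [hQ]; exact (Nat.mul_comm L (N/L)) ▸ Nat.div_mul_le_self N L)
      have hRN : R ≤ N := Nat.div_le_self N Q
      have hblock : ∀ d, L ≤ d → d ≤ R → N / d = Q := by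
        intro d hd1 hd2
        have hub : N / d ≤ Q := by rw [hQ]; exact Nat.div_le_div_left hd1 (by omega)
        have hlb : Q ≤ N / d := by
          rw [Nat.le_div_iff_mul_le (by omega)]
          calc Q * d ≤ Q * R := Nat.mul_le_mul_left Q hd2
            _ = Q * (N / Q) := by rw [hR]
            _ ≤ N := Nat.mul_div_le N Q
        omega
      -- unfold one loop step
      simp only [sigma2Loop, if_pos hl]
      rw [hq, hr]
      -- rewrite helper values via sum_sq_mod_eq
      have hs2r : sum_sq_mod ((R : Nat) : Int) m = PySem.Int.mod ((pvS2 R : Nat) : Int) m := by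
        rw [sum_sq_mod_eq _ m hm (by positivity), Int.toNat_natCast]
      have hprev : sum_sq_mod (l - 1) m = PySem.Int.mod ((pvS2 (L - 1) : Nat) : Int) m := by
        rw [sum_sq_mod_eq _ m hm (by omega)]
        have : (l - 1).toNat = L - 1 := by omega
        rw [this]
      rw [hs2r, hprev]
      -- the new total equals pm of the partial sum up to R
      have hnewtotal :
          PySem.Int.mod
            (PySem.Int.mod ((∑ d ∈ Finset.Ioc 0 (l-1).toNat, d ^ 2 * (N / d) : Nat) : Int) m +
              (if PySem.Int.mod ((pvS2 R : Nat) : Int) m - PySem.Int.mod ((pvS2 (L-1) : Nat) : Int) m < 0 then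
                 PySem.Int.mod ((pvS2 R : Nat) : Int) m - PySem.Int.mod ((pvS2 (L-1) : Nat) : Int) m + m
               else PySem.Int.mod ((pvS2 R : Nat) : Int) m - PySem.Int.mod ((pvS2 (L-1) : Nat) : Int) m) *
                PySem.Int.mod ((Q : Nat) : Int) m) m
          = PySem.Int.mod ((∑ d ∈ Finset.Ioc 0 R, d ^ 2 * (N / d) : Nat) : Int) m := by
        apply pymod_congr hm
        have hrs : Int.ModEq m
            (if PySem.Int.mod ((pvS2 R : Nat) : Int) m - PySem.Int.mod ((pvS2 (L-1) : Nat) : Int) m < 0 then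
               PySem.Int.mod ((pvS2 R : Nat) : Int) m - PySem.Int.mod ((pvS2 (L-1) : Nat) : Int) m + m
             else PySem.Int.mod ((pvS2 R : Nat) : Int) m - PySem.Int.mod ((pvS2 (L-1) : Nat) : Int) m)
            (((pvS2 R : Nat) : Int) - ((pvS2 (L-1) : Nat) : Int)) := by
          have base : Int.ModEq m
              (PySem.Int.mod ((pvS2 R : Nat) : Int) m - PySem.Int.mod ((pvS2 (L-1) : Nat) : Int) m)
              (((pvS2 R : Nat) : Int) - ((pvS2 (L-1) : Nat) : Int)) :=
            (pymod_modeq _ m).sub (pymod_modeq _ m)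
          split_ifs
          · exact (modeq_add_self m _).trans base
          · exact base
        have hcomb : Int.ModEq m
            (PySem.Int.mod ((∑ d ∈ Finset.Ioc 0 (l-1).toNat, d ^ 2 * (N / d) : Nat) : Int) m +
              (if PySem.Int.mod ((pvS2 R : Nat) : Int) m - PySem.Int.mod ((pvS2 (L-1) : Nat) : Int) m < 0 then
                 PySem.Int.mod ((pvS2 R : Nat) : Int) m - PySem.Int.mod ((pvS2 (L-1) : Nat) : Int) m + m
               else PySem.Int.mod ((pvS2 R : Nat) : Int) m - PySem.Int.mod ((pvS2 (L-1) : Nat) : Int) m) *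
                PySem.Int.mod ((Q : Nat) : Int) m)
            (((∑ d ∈ Finset.Ioc 0 (l-1).toNat, d ^ 2 * (N / d) : Nat) : Int) +
              (((pvS2 R : Nat) : Int) - ((pvS2 (L-1) : Nat) : Int)) * ((Q : Nat) : Int)) :=
          (pymod_modeq _ m).add (hrs.mul (pymod_modeq _ m))
        refine hcomb.trans ?_
        -- equality of the two exact values
        have hLt : (l - 1).toNat = L - 1 := by omega
        rw [hLt]
        have hbs := block_sum N L R Q hL1 (by omega) hblock
        have hcast : ((∑ d ∈ Finset.Ioc 0 R, d ^ 2 * (N / d) : Nat) : Int) + ((pvS2 (L-1) : Nat) : Int) * (Q : Int)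
            = ((∑ d ∈ Finset.Ioc 0 (L-1), d ^ 2 * (N / d) : Nat) : Int) + ((pvS2 R : Nat) : Int) * (Q : Int) := by
          exact_mod_cast congrArg (fun k : Nat => (k : Int)) hbs
        have heq : ((∑ d ∈ Finset.Ioc 0 (L-1), d ^ 2 * (N / d) : Nat) : Int) +
              (((pvS2 R : Nat) : Int) - ((pvS2 (L-1) : Nat) : Int)) * ((Q : Nat) : Int)
            = ((∑ d ∈ Finset.Ioc 0 R, d ^ 2 * (N / d) : Nat) : Int) := by
          linarith [hcast]
        rw [heq]
      rw [hnewtotal]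
      -- apply the induction hypothesis at l' = R + 1
      have happ := ih ((R : Int) + 1) (by omega) (by omega) (by push_cast at h3 ⊢; omega)
      have hRt : (((R : Int) + 1) - 1).toNat = R := by omega
      rw [hRt] at happ
      have hprev2 : sum_sq_mod (((R : Int) + 1) - 1) m = sum_sq_mod ((R : Nat) : Int) m := by norm_num
      rw [hprev2, hs2r] at happ
      exact happ
    · -- guard false: l = n + 1, partial sum is already complete
      have hl2 : l = n + 1 := by omega
      have he : (l - 1).toNat = n.toNat := by omega
      simp only [sigma2Loop, if_neg hl, he, pvT]

theorem sigma2_summatory_eq (n m : Int) (hm : m ≠ 0) (hn : 1 ≤ n) :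
    sigma2_summatory n m = PySem.Int.mod ((pvT n.toNat : Nat) : Int) m := by
  have h := sigma2Loop_inv n m hm hn (n.toNat + 1) 1 (by omega) (by omega) (by omega)
  have h0 : PySem.Int.mod ((∑ d ∈ Finset.Ioc 0 ((1:Int)-1).toNat, d ^ 2 * (n.toNat / d) : Nat) : Int) m = 0 := by
    norm_num [PySem.Int.mod]
  have hp0 : sum_sq_mod ((1:Int) - 1) m = 0 := by norm_num [sum_sq_mod]
  rw [h0, hp0] at h
  exact h

-- ---- B: isqrt loop ----
theorem isqrtLoop_step (n : Int) (hn : 1 ≤ n) :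
    ∀ (fuel i : Nat), i ≤ Nat.sqrt n.toNat → Nat.sqrt n.toNat - i ≤ fuel →
      isqrtLoop n fuel (i : Int) = (Nat.sqrt n.toNat : Int) := by
  intro fuel
  induction fuel with
  | zero =>
    intro i h1 h2
    have : i = Nat.sqrt n.toNat := by omega
    simp [isqrtLoop, this]
  | succ fuel ih =>
    intro i h1 h2
    by_cases hc : ((i : Int) + 1) * ((i : Int) + 1) ≤ n
    · have hc' : (i + 1) * (i + 1) ≤ n.toNat := by
        have hnn : ((n.toNat : Int)) = n := by omega
        exact_mod_cast hc.trans_eq hnn.symm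
      have hle : i + 1 ≤ Nat.sqrt n.toNat := Nat.le_sqrt.mpr hc'
      have := ih (i + 1) hle (by omega)
      simp only [isqrtLoop, if_pos hc]
      push_cast at this ⊢
      exact this
    · have hgt : ¬ (i + 1) * (i + 1) ≤ n.toNat := by
        intro hcon
        apply hc
        have hci : (((i+1) : Nat) : Int) * (((i+1) : Nat) : Int) ≤ ((n.toNat : Int)) := by
          exact_mod_cast hcon
        push_cast at hci
        omega
      have hge : Nat.sqrt n.toNat ≤ i := by
        by_contra hlt
        have hsucc : i + 1 ≤ Nat.sqrt n.toNat := by omega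
        exact hgt (le_trans (Nat.mul_le_mul hsucc hsucc) (Nat.sqrt_le n.toNat))
      have hieq : i = Nat.sqrt n.toNat := by omega
      subst hieq
      simp only [isqrtLoop, if_neg hc]

theorem isqrtLoop_eq (n : Int) (hn : 1 ≤ n) :
    isqrtLoop n n.toNat 0 = (Nat.sqrt n.toNat : Int) := by
  have := isqrtLoop_step n hn n.toNat 0 (Nat.zero_le _) (by
    have := Nat.sqrt_le_self n.toNat
    omega)
  simpa using this

-- ---- hyperbola identity ----
theorem hyperbola (N : Nat) :
    pvT N + pvS2 (Nat.sqrt N) * Nat.sqrt N =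
      (∑ d ∈ Finset.Ioc 0 (Nat.sqrt N), d ^ 2 * (N / d)) +
      (∑ e ∈ Finset.Ioc 0 (Nat.sqrt N), pvS2 (N / e)) := by
  set s := Nat.sqrt N with hs
  have hsN : s ≤ N := Nat.sqrt_le_self N
  have hss : s * s ≤ N := Nat.sqrt_le N
  -- fibers of the pair-counting sum
  have F1 : ∀ d ∈ Finset.Ioc 0 N, (∑ e ∈ Finset.Ioc 0 N, if d * e ≤ N then d ^ 2 else 0) = d ^ 2 * (N / d) := by
    intro d hd
    rw [Finset.mem_Ioc] at hd
    rw [← Finset.sum_filter]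
    have hfil : Finset.filter (fun e => d * e ≤ N) (Finset.Ioc 0 N) = Finset.Ioc 0 (N / d) := by
      ext e
      simp only [Finset.mem_filter, Finset.mem_Ioc]
      constructor
      · rintro ⟨⟨he0, _⟩, hde⟩
        exact ⟨he0, (Nat.le_div_iff_mul_le hd.1).mpr (by rw [Nat.mul_comm]; exact hde)⟩
      · rintro ⟨he0, hediv⟩
        refine ⟨⟨he0, le_trans hediv (Nat.div_le_self N d)⟩, ?_⟩
        rw [Nat.mul_comm]
        exact (Nat.le_div_iff_mul_le hd.1).mp hediv
    rw [hfil, Finset.sum_const, Nat.card_Ioc, smul_eq_mul, Nat.sub_zero, Nat.mul_comm]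
  have F2 : ∀ e ∈ Finset.Ioc 0 s, (∑ d ∈ Finset.Ioc 0 N, if d * e ≤ N then d ^ 2 else 0) = pvS2 (N / e) := by
    intro e he
    rw [Finset.mem_Ioc] at he
    rw [← Finset.sum_filter]
    have hfil : Finset.filter (fun d => d * e ≤ N) (Finset.Ioc 0 N) = Finset.Ioc 0 (N / e) := by
      ext d
      simp only [Finset.mem_filter, Finset.mem_Ioc]
      constructor
      · rintro ⟨⟨hd0, _⟩, hde⟩
        exact ⟨hd0, (Nat.le_div_iff_mul_le he.1).mpr hde⟩
      · rintro ⟨hd0, hddiv⟩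
        exact ⟨⟨hd0, le_trans hddiv (Nat.div_le_self N e)⟩, (Nat.le_div_iff_mul_le he.1).mp hddiv⟩
    rw [hfil, pvS2]
  -- for d beyond sqrt N the inner sum only sees e ≤ s
  have key : ∀ d ∈ Finset.Ioc s N, (∑ e ∈ Finset.Ioc 0 N, if d * e ≤ N then d ^ 2 else 0)
      = (∑ e ∈ Finset.Ioc 0 s, if d * e ≤ N then d ^ 2 else 0) := by
    intro d hd
    rw [Finset.mem_Ioc] at hd
    rw [← Finset.sum_Ioc_consecutive (fun e => if d * e ≤ N then d ^ 2 else 0) (Nat.zero_le s) hsN]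
    have hz : (∑ e ∈ Finset.Ioc s N, if d * e ≤ N then d ^ 2 else 0) = 0 := by
      apply Finset.sum_eq_zero
      intro e he
      rw [Finset.mem_Ioc] at he
      have : N < d * e := by
        calc N < (Nat.sqrt N + 1) * (Nat.sqrt N + 1) := by
              have := Nat.lt_succ_sqrt' N
              rw [pow_two] at this
              omega
          _ ≤ d * e := Nat.mul_le_mul (by omega) (by omega)
      rw [if_neg (by omega)]
    omega
  -- the four rectangle pieces
  have hT : pvT N = (∑ d ∈ Finset.Ioc 0 s, ∑ e ∈ Finset.Ioc 0 N, if d * e ≤ N then d ^ 2 else 0)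
      + (∑ d ∈ Finset.Ioc s N, ∑ e ∈ Finset.Ioc 0 N, if d * e ≤ N then d ^ 2 else 0) := by
    rw [Finset.sum_Ioc_consecutive _ (Nat.zero_le s) hsN, pvT]
    exact (Finset.sum_congr rfl F1).symm
  have hA2B2 : (∑ d ∈ Finset.Ioc s N, ∑ e ∈ Finset.Ioc 0 N, if d * e ≤ N then d ^ 2 else 0)
      = (∑ d ∈ Finset.Ioc s N, ∑ e ∈ Finset.Ioc 0 s, if d * e ≤ N then d ^ 2 else 0) :=
    Finset.sum_congr rfl key
  have hterm1 : (∑ d ∈ Finset.Ioc 0 s, d ^ 2 * (N / d))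
      = (∑ d ∈ Finset.Ioc 0 s, ∑ e ∈ Finset.Ioc 0 N, if d * e ≤ N then d ^ 2 else 0) := by
    apply Finset.sum_congr rfl
    intro d hd
    rw [Finset.mem_Ioc] at hd
    exact (F1 d (Finset.mem_Ioc.mpr ⟨hd.1, le_trans hd.2 hsN⟩)).symm
  have hterm2 : (∑ e ∈ Finset.Ioc 0 s, pvS2 (N / e))
      = (∑ d ∈ Finset.Ioc 0 s, ∑ e ∈ Finset.Ioc 0 s, if d * e ≤ N then d ^ 2 else 0)
        + (∑ d ∈ Finset.Ioc s N, ∑ e ∈ Finset.Ioc 0 s, if d * e ≤ N then d ^ 2 else 0) := by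
    rw [← (Finset.sum_congr rfl F2), Finset.sum_comm,
        Finset.sum_Ioc_consecutive (fun d => ∑ e ∈ Finset.Ioc 0 s, if d * e ≤ N then d ^ 2 else 0)
          (Nat.zero_le s) hsN]
  have hC : (∑ d ∈ Finset.Ioc 0 s, ∑ e ∈ Finset.Ioc 0 s, if d * e ≤ N then d ^ 2 else 0)
      = pvS2 s * s := by
    have : ∀ d ∈ Finset.Ioc 0 s, (∑ e ∈ Finset.Ioc 0 s, if d * e ≤ N then d ^ 2 else 0) = d ^ 2 * s := by
      intro d hd
      rw [Finset.mem_Ioc] at hd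
      have : ∀ e ∈ Finset.Ioc 0 s, (if d * e ≤ N then d ^ 2 else 0) = d ^ 2 := by
        intro e he
        rw [Finset.mem_Ioc] at he
        exact if_pos (le_trans (Nat.mul_le_mul hd.2 he.2) hss)
      rw [Finset.sum_congr rfl this, Finset.sum_const, Nat.card_Ioc, smul_eq_mul, Nat.sub_zero, Nat.mul_comm]
    rw [Finset.sum_congr rfl this, ← Finset.sum_mul, pvS2]
  omega

-- ---- B characterization ----
theorem foldB (n m : Int) (hm : m ≠ 0) (hn : 1 ≤ n) :
    ∀ (k j : Nat),
      (PySem.List.pyRange ((j : Int) + 1) ((j : Int) + (k : Int) + 1) 1).foldl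
        (fun (tp : Int × Int) d =>
          (PySem.Int.mod (tp.1 + PySem.Int.mod (d * d) m * PySem.Int.mod (PySem.Int.floordiv n d) m) m,
           PySem.Int.mod (tp.2 + sum_sq_mod (PySem.Int.floordiv n d) m) m))
        (PySem.Int.mod ((∑ d ∈ Finset.Ioc 0 j, d ^ 2 * (n.toNat / d) : Nat) : Int) m,
         PySem.Int.mod ((∑ e ∈ Finset.Ioc 0 j, pvS2 (n.toNat / e) : Nat) : Int) m)
      = (PySem.Int.mod ((∑ d ∈ Finset.Ioc 0 (j + k), d ^ 2 * (n.toNat / d) : Nat) : Int) m,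
         PySem.Int.mod ((∑ e ∈ Finset.Ioc 0 (j + k), pvS2 (n.toNat / e) : Nat) : Int) m) := by
  intro k
  induction k with
  | zero =>
    intro j
    rw [PySem.List.pyRange_one_eq_nil (by push_cast; omega)]
    simp
  | succ k ih =>
    intro j
    set N := n.toNat with hN
    have hnN : n = (N : Int) := by omega
    rw [PySem.List.pyRange_one_cons (by push_cast; omega)]
    simp only [List.foldl_cons]
    have hdiv : PySem.Int.floordiv n ((j : Int) + 1) = ((N / (j + 1) : Nat) : Int) := by
      have hcast : (j : Int) + 1 = ((j + 1 : Nat) : Int) := by push_cast; ring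
      rw [hnN, hcast, PySem.Int.floordiv_natCast]
    have ht1 : PySem.Int.mod
        (PySem.Int.mod ((∑ d ∈ Finset.Ioc 0 j, d ^ 2 * (N / d) : Nat) : Int) m +
          PySem.Int.mod (((j : Int) + 1) * ((j : Int) + 1)) m *
            PySem.Int.mod (PySem.Int.floordiv n ((j : Int) + 1)) m) m
        = PySem.Int.mod ((∑ d ∈ Finset.Ioc 0 (j + 1), d ^ 2 * (N / d) : Nat) : Int) m := by
      rw [hdiv]
      apply pymod_congr hm
      have hcong := (pymod_modeq ((∑ d ∈ Finset.Ioc 0 j, d ^ 2 * (N / d) : Nat) : Int) m).add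
        ((pymod_modeq (((j : Int) + 1) * ((j : Int) + 1)) m).mul
          (pymod_modeq (((N / (j + 1) : Nat) : Int)) m))
      refine hcong.trans ?_
      have hsum : (∑ d ∈ Finset.Ioc 0 (j + 1), d ^ 2 * (N / d)) =
          (∑ d ∈ Finset.Ioc 0 j, d ^ 2 * (N / d)) + (j + 1) ^ 2 * (N / (j + 1)) :=
        Finset.sum_Ioc_succ_top (Nat.zero_le j) _
      have : ((∑ d ∈ Finset.Ioc 0 j, d ^ 2 * (N / d) : Nat) : Int) +
          ((j : Int) + 1) * ((j : Int) + 1) * ((N / (j + 1) : Nat) : Int)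
          = ((∑ d ∈ Finset.Ioc 0 (j + 1), d ^ 2 * (N / d) : Nat) : Int) := by
        rw [hsum]
        push_cast
        ring
      rw [this]
    have ht2 : PySem.Int.mod
        (PySem.Int.mod ((∑ e ∈ Finset.Ioc 0 j, pvS2 (N / e) : Nat) : Int) m +
          sum_sq_mod (PySem.Int.floordiv n ((j : Int) + 1)) m) m
        = PySem.Int.mod ((∑ e ∈ Finset.Ioc 0 (j + 1), pvS2 (N / e) : Nat) : Int) m := by
      rw [hdiv, sum_sq_mod_eq _ m hm (by positivity), Int.toNat_natCast]
      apply pymod_congr hm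
      have hcong := (pymod_modeq ((∑ e ∈ Finset.Ioc 0 j, pvS2 (N / e) : Nat) : Int) m).add
        (pymod_modeq ((pvS2 (N / (j + 1)) : Nat) : Int) m)
      refine hcong.trans ?_
      have hsum : (∑ e ∈ Finset.Ioc 0 (j + 1), pvS2 (N / e)) =
          (∑ e ∈ Finset.Ioc 0 j, pvS2 (N / e)) + pvS2 (N / (j + 1)) :=
        Finset.sum_Ioc_succ_top (Nat.zero_le j) _
      have : ((∑ e ∈ Finset.Ioc 0 j, pvS2 (N / e) : Nat) : Int) + ((pvS2 (N / (j + 1)) : Nat) : Int)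
          = ((∑ e ∈ Finset.Ioc 0 (j + 1), pvS2 (N / e) : Nat) : Int) := by
        rw [hsum]; push_cast; ring
      rw [this]
    rw [ht1, ht2]
    have e1 : (j : Int) + 1 + 1 = ((j + 1 : Nat) : Int) + 1 := by push_cast; ring
    have e2 : (j : Int) + ((k : Nat) + 1 : Nat) + 1 = ((j + 1 : Nat) : Int) + (k : Int) + 1 := by
      push_cast; ring
    rw [e1, e2, ih (j + 1)]
    rw [show j + (k + 1) = (j + 1) + k from by omega]

theorem sigma2_summatory_alt_eq (n m : Int) (hm : m ≠ 0) (hn : 1 ≤ n) :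
    sigma2_summatory_alt n m = PySem.Int.mod ((pvT n.toNat : Nat) : Int) m := by
  set N := n.toNat with hN
  set S := Nat.sqrt N with hS
  have hsq := isqrtLoop_eq n hn
  simp only [sigma2_summatory_alt, if_neg (show ¬ n ≤ 0 by omega), hsq]
  have hfold := foldB n m hm hn S 0
  have h01 : PySem.Int.mod ((∑ d ∈ Finset.Ioc 0 0, d ^ 2 * (N / d) : Nat) : Int) m = 0 := by
    norm_num [PySem.Int.mod]
  have h02 : PySem.Int.mod ((∑ e ∈ Finset.Ioc 0 0, pvS2 (N / e) : Nat) : Int) m = 0 := by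
    norm_num [PySem.Int.mod]
  rw [h01, h02] at hfold
  simp only [Nat.cast_zero, zero_add] at hfold
  rw [hfold]
  have hcorr : sum_sq_mod ((S : Int)) m = PySem.Int.mod ((pvS2 S : Nat) : Int) m := by
    rw [sum_sq_mod_eq _ m hm (by positivity), Int.toNat_natCast]
  rw [hcorr]
  apply pymod_congr hm
  have hcong := ((pymod_modeq ((∑ d ∈ Finset.Ioc 0 S, d ^ 2 * (N / d) : Nat) : Int) m).add
      (pymod_modeq ((∑ e ∈ Finset.Ioc 0 S, pvS2 (N / e) : Nat) : Int) m)).sub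
    ((pymod_modeq _ m).trans ((pymod_modeq ((pvS2 S : Nat) : Int) m).mul (pymod_modeq ((S : Int)) m)))
  refine hcong.trans ?_
  have hhyp := hyperbola N
  have : ((∑ d ∈ Finset.Ioc 0 S, d ^ 2 * (N / d) : Nat) : Int) +
      ((∑ e ∈ Finset.Ioc 0 S, pvS2 (N / e) : Nat) : Int) -
      ((pvS2 S : Nat) : Int) * ((S : Nat) : Int)
      = ((pvT N : Nat) : Int) := by
    have hc : ((pvT N : Nat) : Int) + ((pvS2 S : Nat) : Int) * ((S : Nat) : Int)
        = ((∑ d ∈ Finset.Ioc 0 S, d ^ 2 * (N / d) : Nat) : Int) +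
          ((∑ e ∈ Finset.Ioc 0 S, pvS2 (N / e) : Nat) : Int) := by
      exact_mod_cast congrArg (fun k : Nat => (k : Int)) hhyp
    linarith
  rw [this]

-- ===== VERDICT (by name: the statement is the Claim_ definition above) =====
theorem sigma2_summatory_spec : Claim_equal_sigma2_summatory := by
  intro n m _ hpre
  unfold Spec_sigma2_summatory
  by_cases hn : 1 ≤ n
  · have hm : m ≠ 0 := by
      rcases hpre with h | h
      · exact h
      · omega
    rw [sigma2_summatory_eq n m hm hn, sigma2_summatory_alt_eq n m hm hn]
  · -- n ≤ 0: both sides are 0 by the guards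
    have hn0 : n ≤ 0 := by omega
    have ht : n.toNat = 0 := by omega
    unfold sigma2_summatory sigma2_summatory_alt
    rw [ht, if_pos hn0]
    show sigma2Loop n m (0 + 1) 0 1 0 = 0
    simp only [sigma2Loop, if_neg (by omega : ¬ (1:Int) ≤ n)]
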